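-- pv_equiv track=rewrite | github.com/pypi-data/pypi-mirror-47 | packages/minipush/minipush-0.0.13.tar.gz/minipush-0.0.13/minipush/push.py | lenext
-- ===== SOURCE A (Python) =====
-- def lenext(l):
--     d={}
--     for _ in l:
--         ext=_.split(".")[::-1][0]
--         if d.get(ext)==None:
--             d[ext]=0
--         d[ext]+=1
--     d["total"]=len(l)
--     return d
-- ===== SOURCE B (Python) =====
-- def lenext(l):
--     # Repeated partition: peel off the first remaining extension, drop all its
--     # occurrences with a filter, and read its count off the length difference.
--     exts = [x.split(".")[-1] for x in l]
--     d = {}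
--     while exts:
--         e = exts[0]
--         rest = [y for y in exts[1:] if y != e]
--         d[e] = len(exts) - len(rest)
--         exts = rest
--     d["total"] = len(l)
--     return d
-- ===== Notes on version B (the rewrite author's own statement) =====
-- stated objective: alternative
-- what changed: Replaces A's per-element get/initialize/increment dict accumulation with a repeated-partition loop: peel the first remaining extension, filter out all its occurrences, and obtain its count as the length drop, so the dict never stores running counts.
import Mathlib
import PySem

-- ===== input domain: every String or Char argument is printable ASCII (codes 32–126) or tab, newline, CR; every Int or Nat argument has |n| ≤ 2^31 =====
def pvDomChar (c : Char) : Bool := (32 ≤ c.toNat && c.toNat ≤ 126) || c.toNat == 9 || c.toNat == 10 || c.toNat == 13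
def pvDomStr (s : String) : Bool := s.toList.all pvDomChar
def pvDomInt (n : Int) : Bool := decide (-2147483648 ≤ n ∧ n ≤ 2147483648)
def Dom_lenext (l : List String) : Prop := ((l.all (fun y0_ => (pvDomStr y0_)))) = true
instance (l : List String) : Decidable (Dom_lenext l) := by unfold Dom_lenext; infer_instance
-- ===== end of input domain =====

-- B replaces A's per-element dict increments with a repeated-partition loop (filter out each
-- extension, count = length drop); same value and key order, objective: alternative.

-- ===== PORT A =====
def lenext (l : List String) : List (String × Int) :=
  let d := l.foldl (fun (d : PySem.Dict String Int) x =>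
      -- ext = _.split(".")[::-1][0]; sep "." ≠ "" so split? is some, the split list is
      -- nonempty so index 0 is in range: the getD defaults are never consulted (exact)
      let ext := PySem.List.pyGetD
        ((PySem.List.slice? ((PySem.Str.split? x ".").getD []) none none (-1)).getD []) 0 ""
      let d := if d.get? ext == none then d.insert ext (0 : Int) else d
      d.insert ext (d.getD ext 0 + 1)) PySem.Dict.empty
  (d.insert "total" (l.length : Int)).items

-- ===== PORT B =====
-- the while loop of Source B: peel exts[0], filter it out of the tail, record d[e] = length drop
def pvGoB (xs : List String) (d : PySem.Dict String Int) : PySem.Dict String Int :=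
  match xs with
  | [] => d
  | e :: t =>
    let rest := t.filter (fun y => y != e)
    pvGoB rest (d.insert e ((((e :: t).length : Int)) - (rest.length : Int)))
termination_by xs.length
decreasing_by
  simp only [List.length_cons, List.length_unattach]
  exact Nat.lt_succ_of_le (le_trans (List.length_filter_le _ _) (by simp))

def lenext_alt (l : List String) : List (String × Int) :=
  -- exts = [x.split(".")[-1] for x in l]; split lists are nonempty so [-1] is in range (exact)
  let exts := l.map (fun x => PySem.List.pyGetD ((PySem.Str.split? x ".").getD []) (-1) "")
  let d := pvGoB exts PySem.Dict.empty
  (d.insert "total" (l.length : Int)).items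

-- ===== PRECONDITION & SPEC =====
def Spec_lenext (l : List String) (out : List (String × Int)) : Prop := out = lenext_alt l
instance (l : List String) (out : List (String × Int)) : Decidable (Spec_lenext l out) := by unfold Spec_lenext; infer_instance

-- ===== CLAIM (what is proved, stated in full; the proofs are below) =====
def Claim_equal_lenext : Prop := ∀ (l : List String), Dom_lenext l → Spec_lenext l (lenext l)

-- ===== LEMMAS AND PROOFS =====

-- the extension both programs compute for one string
def pvKey (x : String) : String :=
  PySem.List.pyGetD ((PySem.Str.split? x ".").getD []) (-1) ""

-- A's "reverse then [0]" equals B's "[-1]"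
theorem pvKey_eqA (x : String) :
    PySem.List.pyGetD
      ((PySem.List.slice? ((PySem.Str.split? x ".").getD []) none none (-1)).getD []) 0 ""
      = pvKey x := by
  unfold pvKey
  set ps := (PySem.Str.split? x ".").getD [] with hps
  rw [PySem.List.slice?_none_none_neg_one, Option.getD_some]
  cases ps with
  | nil => rfl
  | cons a as =>
    rw [PySem.List.pyGetD_neg_one _ _ (by simp), PySem.List.pyGetD_zero]
    rw [List.getD_eq_getElem?_getD, ← List.head?_eq_getElem?, List.head?_reverse]
    simp [List.getLast?_eq_some_getLast]

-- A's loop body is the canonical "insert (getD + 1)" step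
theorem pvStep_eq (d : PySem.Dict String Int) (e : String) :
    (let d' := if d.get? e == none then d.insert e (0 : Int) else d
     d'.insert e (d'.getD e 0 + 1)) = d.insert e (d.getD e 0 + 1) := by
  cases h : d.get? e with
  | none =>
    simp only [beq_self_eq_true, if_pos]
    rw [show (d.insert e (0 : Int)).getD e 0 = 0 by
          simp [PySem.Dict.getD, PySem.Dict.get?_insert_self],
        PySem.Dict.insert_insert_self]
    simp [PySem.Dict.getD, h]
  | some v =>
    simp [h, PySem.Dict.getD]

-- B's partition recursion produces Counter(xs)'s items appended to d's
theorem pvLenSplit (t : List String) (e : String) :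
    t.length = List.count e t + (t.filter (fun y => y != e)).length := by
  induction t with
  | nil => simp
  | cons a t ih =>
    by_cases h : a = e <;> simp [h, bne, ih] <;> omega

theorem pvOfList_filter (p : String → Bool) (l : List String) :
    PySem.Set.ofList (l.filter p) = (PySem.Set.ofList l).filter p := by
  induction l with
  | nil => simp [PySem.Set.ofList_nil]
  | cons a t ih =>
    by_cases hp : p a
    · simp only [List.filter_cons, hp, if_pos, PySem.Set.ofList_cons, ih, PySem.Set.discard,
        List.filter_filter]
      congr 1
      apply List.filter_congr
      intro x _
      rw [Bool.and_comm]
    · simp only [List.filter_cons, hp, if_neg, Bool.false_eq_true, not_false_iff,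
        PySem.Set.ofList_cons, ih, PySem.Set.discard, List.filter_filter]
      apply List.filter_congr
      intro x hx
      by_cases hxa : x = a
      · subst hxa; simp [hp]
      · simp [hxa]

theorem pvGoB_items (n : Nat) : ∀ (xs : List String) (d : PySem.Dict String Int),
    xs.length ≤ n → (∀ e ∈ xs, d.contains e = false) →
    (pvGoB xs d).items
      = d.items ++ (PySem.Set.ofList xs).map (fun k => (k, (xs.count k : Int))) := by
  induction n with
  | zero =>
    intro xs d hlen _
    have : xs = [] := List.eq_nil_of_length_eq_zero (Nat.le_zero.mp hlen)
    subst this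
    simp [pvGoB, PySem.Set.ofList_nil]
  | succ m ih =>
    intro xs d hlen hfresh
    cases xs with
    | nil => simp [pvGoB, PySem.Set.ofList_nil]
    | cons e t =>
      rw [pvGoB]
      have he : d.contains e = false := hfresh e (List.mem_cons_self ..)
      set rest := t.filter (fun y => y != e) with hrest
      have hrlen : rest.length ≤ m := by
        have h := List.length_filter_le (fun y => y != e) t
        rw [← hrest] at h
        simp only [List.length_cons] at hlen
        omega
      have hfresh' : ∀ a ∈ rest, (d.insert e (((e :: t).length : Int) - (rest.length : Int))).contains a = false := by
        intro a ha
        have hat : a ∈ t := List.mem_of_mem_filter ha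
        have hane : a ≠ e := by
          have := List.of_mem_filter ha
          simpa [bne] using this
        rw [PySem.Dict.contains_eq_decide_mem_keys, PySem.Dict.keys_insert_of_not_contains _ _ he]
        have had : d.contains a = false := hfresh a (List.mem_cons_of_mem _ hat)
        rw [PySem.Dict.contains_eq_decide_mem_keys] at had
        simp only [List.mem_append, List.mem_singleton, decide_eq_false_iff_not, not_or]
        exact ⟨by simpa using had, hane⟩
      rw [ih rest _ hrlen hfresh',
          PySem.Dict.items_insert_of_not_contains _ _ he]
      rw [PySem.Set.ofList_cons, List.map_cons, List.append_assoc]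
      congr 1
      have hs := pvLenSplit t e
      rw [← hrest] at hs
      have hc : (((e :: t).length : Int)) - (rest.length : Int)
          = ((List.count e (e :: t) : Nat) : Int) := by
        simp only [List.length_cons, List.count_cons_self]
        push_cast
        omega
      rw [hc, List.singleton_append]
      congr 1
      rw [hrest, pvOfList_filter]
      have hdis : (PySem.Set.ofList t).filter (fun y => y != e)
          = PySem.Set.discard (PySem.Set.ofList t) e := by
        simp [PySem.Set.discard, bne]
      rw [hdis]
      apply List.map_congr_left
      intro k hk
      have hkne : k ≠ e := ((PySem.Set.mem_discard _ _ _).mp hk).2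
      have h1 : List.count k (t.filter (fun y => y != e)) = List.count k t :=
        List.count_filter (by simp [bne, hkne])
      have h2 : List.count k (e :: t) = List.count k t := by
        simp [Ne.symm hkne]
      simp [h1, h2]

theorem lenext_eq_alt (l : List String) : lenext l = lenext_alt l := by
  unfold lenext lenext_alt
  rw [show (fun x : String => PySem.List.pyGetD ((PySem.Str.split? x ".").getD []) (-1) "")
        = pvKey from rfl]
  simp only [pvKey_eqA]
  have hA : l.foldl (fun (d : PySem.Dict String Int) x =>
      let d' := if d.get? (pvKey x) == none then d.insert (pvKey x) (0 : Int) else d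
      d'.insert (pvKey x) (d'.getD (pvKey x) 0 + 1)) PySem.Dict.empty
      = PySem.Dict.counter (l.map pvKey) := by
    have hfun : (fun (d : PySem.Dict String Int) x =>
        let d' := if d.get? (pvKey x) == none then d.insert (pvKey x) (0 : Int) else d
        d'.insert (pvKey x) (d'.getD (pvKey x) 0 + 1))
        = fun (d : PySem.Dict String Int) x => d.insert (pvKey x) (d.getD (pvKey x) 0 + 1) := by
      funext d x; exact pvStep_eq d (pvKey x)
    rw [hfun, ← PySem.Dict.foldl_insert_getD_add_one_eq_counter, List.foldl_map]
  have hB : pvGoB (l.map pvKey) PySem.Dict.empty = PySem.Dict.counter (l.map pvKey) := by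
    apply PySem.Dict.ext
    rw [pvGoB_items (l.map pvKey).length (l.map pvKey) PySem.Dict.empty le_rfl
          (fun e _ => by simp [PySem.Dict.contains_empty]),
        PySem.Dict.items_counter]
    simp [PySem.Dict.empty]
  rw [hA, hB]

-- ===== VERDICT (by name: the statement is the Claim_ definition above) =====
theorem lenext_spec : Claim_equal_lenext := by
  intro l _
  unfold Spec_lenext
  exact lenext_eq_alt l
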